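-- pv_equiv track=rewrite | github.com/Steph12321/cross-stitch-generator | pattern.py | assign_symbols
-- ===== SOURCE A (Python) =====
-- SYMBOLS = "ABCDEFGHIJKLMNOPQRSTUVWXYZ0123456789"
--
-- def assign_symbols(dmc_list):
--     """
--     Assign a unique letter/digit symbol to each distinct DMC number.
--
--     Returns a dict mapping dmc_number → symbol string.
--     """
--     seen = {}
--     symbol_idx = 0
--     for entry in dmc_list:
--         key = entry["dmc"]
--         if key not in seen:
--             seen[key] = SYMBOLS[symbol_idx % len(SYMBOLS)]
--             symbol_idx += 1
--     return seen
-- ===== SOURCE B (Python) =====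
-- SYMBOLS = "ABCDEFGHIJKLMNOPQRSTUVWXYZ0123456789"
--
--
-- def assign_symbols(dmc_list):
--     """
--     Assign a unique letter/digit symbol to each distinct DMC number.
--
--     Returns a dict mapping dmc_number → symbol string.
--     """
--     # Phase 1: record the first-occurrence index of every DMC number.
--     first = {}
--     for i, entry in enumerate(dmc_list):
--         first.setdefault(entry["dmc"], i)
--     # Phase 2: rank keys by first occurrence and assign symbols by rank.
--     order = sorted(first, key=first.get)
--     return {k: SYMBOLS[r % len(SYMBOLS)] for r, k in enumerate(order)}
-- ===== Notes on version B (the rewrite author's own statement) =====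
-- stated objective: alternative
-- what changed: B replaces A's single pass threading a manual symbol counter by a different algorithm: one pass records each DMC number's first-occurrence index with setdefault, then keys are sorted by that index and symbols are assigned by rank; correct because sorting by first occurrence reproduces insertion order.
import Mathlib
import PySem

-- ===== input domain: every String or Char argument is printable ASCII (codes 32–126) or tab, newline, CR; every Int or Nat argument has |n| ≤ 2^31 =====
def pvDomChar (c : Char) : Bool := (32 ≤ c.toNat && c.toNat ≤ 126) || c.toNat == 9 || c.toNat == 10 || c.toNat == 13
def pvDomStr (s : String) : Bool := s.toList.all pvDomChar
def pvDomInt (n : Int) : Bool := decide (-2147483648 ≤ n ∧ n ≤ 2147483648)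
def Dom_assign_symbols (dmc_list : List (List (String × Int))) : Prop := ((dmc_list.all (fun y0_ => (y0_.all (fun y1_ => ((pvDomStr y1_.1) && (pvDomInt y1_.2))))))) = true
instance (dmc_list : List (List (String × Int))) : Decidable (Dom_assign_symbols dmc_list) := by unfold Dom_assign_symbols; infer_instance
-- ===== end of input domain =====

-- B replaces A's counter-threading pass by a different algorithm: record first-occurrence indices, sort keys by them, assign symbols by rank (alternative; O(n log n)).
-- Python A raises KeyError on an entry without a "dmc" key; Pre_ excludes exactly those inputs.


-- module constant SYMBOLS (shared by both Python files)
def pvSYMBOLS : String := "ABCDEFGHIJKLMNOPQRSTUVWXYZ0123456789"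

-- SYMBOLS[i % len(SYMBOLS)] as a one-character string; the index is always in range
-- (0 ≤ i % 36 < 36), so the none branch of pyGet? is unreachable.
def pvSym (i : Int) : String :=
  match PySem.Str.pyGet? pvSYMBOLS (PySem.Int.mod i (PySem.Str.len pvSYMBOLS)) with
  | some c => String.ofList [c]
  | none => ""

-- ===== PORT A =====
def assign_symbols (dmc_list : List (List (String × Int))) : List (Int × String) :=
  let res := dmc_list.foldl
    (fun (st : PySem.Dict Int String × Int) entry =>
      -- key = entry["dmc"]; the KeyError case (no "dmc" key) is excluded by Pre_
      let key := ((PySem.Dict.mk entry).get? "dmc").getD 0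
      if (st.1.contains key) = false then
        (st.1.insert key (pvSym st.2), st.2 + 1)
      else st)
    (PySem.Dict.empty, 0)
  res.1.items

-- ===== PORT B =====
def assign_symbols_alt (dmc_list : List (List (String × Int))) : List (Int × String) :=
  -- phase 1: first = {}; for i, entry in enumerate(dmc_list): first.setdefault(entry["dmc"], i)
  let first := (PySem.List.enumerate dmc_list).foldl
    (fun (d : PySem.Dict Int Int) p =>
      d.setdefault (((PySem.Dict.mk p.2).get? "dmc").getD 0) p.1)
    PySem.Dict.empty
  -- phase 2: order = sorted(first, key=first.get)  (keys are in first, so get never returns None)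
  let order := PySem.List.sorted first.keys (fun k => (first.get? k).getD 0) false
  -- {k: SYMBOLS[r % len(SYMBOLS)] for r, k in enumerate(order)}
  ((PySem.List.enumerate order).foldl
      (fun (d : PySem.Dict Int String) p => d.insert p.2 (pvSym p.1))
      PySem.Dict.empty).items

-- ===== PRECONDITION & SPEC =====
-- Pre_ excludes exactly the inputs on which Python A raises KeyError: an entry without a "dmc" key.
def Pre_assign_symbols (dmc_list : List (List (String × Int))) : Prop :=
  (dmc_list.all (fun entry => (PySem.Dict.mk entry).contains "dmc")) = true
instance (dmc_list : List (List (String × Int))) : Decidable (Pre_assign_symbols dmc_list) := by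
  unfold Pre_assign_symbols; infer_instance

def pvWitness_assign_symbols : (List (List (String × Int))) :=
  [[("dmc", 310)], [("dmc", 310), ("row", 1)], [("dmc", 5)]]

def Spec_assign_symbols (dmc_list : List (List (String × Int))) (out : List (Int × String)) : Prop := out = assign_symbols_alt dmc_list
instance (dmc_list : List (List (String × Int))) (out : List (Int × String)) : Decidable (Spec_assign_symbols dmc_list out) := by unfold Spec_assign_symbols; infer_instance

-- ===== CLAIM (what is proved, stated in full; the proofs are below) =====
def Claim_equal_assign_symbols : Prop := ∀ (dmc_list : List (List (String × Int))), Dom_assign_symbols dmc_list → Pre_assign_symbols dmc_list → Spec_assign_symbols dmc_list (assign_symbols dmc_list)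

-- ===== LEMMAS AND PROOFS =====

-- the key extracted from one entry
def pvKeyOf (entry : List (String × Int)) : Int :=
  ((PySem.Dict.mk entry).get? "dmc").getD 0

-- A's loop body, as a function of the extracted key
def pvStep (st : PySem.Dict Int String × Int) (k : Int) : PySem.Dict Int String × Int :=
  if (st.1.contains k) = false then (st.1.insert k (pvSym st.2), st.2 + 1) else st

-- common reference: the (key, symbol) pairs contributed by ks, given already-seen keys and next index
def pvSpecNew : List Int → List Int → Int → List (Int × String)
  | [], _, _ => []
  | k :: ks, seen, n =>
    if k ∈ seen then pvSpecNew ks seen n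
    else (k, pvSym n) :: pvSpecNew ks (seen ++ [k]) (n + 1)

-- first-occurrence pairs (key, index) contributed by ks, given seen keys and next position
def pvFirst : List Int → List Int → Int → List (Int × Int)
  | [], _, _ => []
  | k :: ks, seen, n =>
    if k ∈ seen then pvFirst ks seen (n + 1)
    else (k, n) :: pvFirst ks (seen ++ [k]) (n + 1)

theorem pvA_as_keys (dmc_list : List (List (String × Int))) :
    assign_symbols dmc_list
      = ((dmc_list.map pvKeyOf).foldl pvStep (PySem.Dict.empty, 0)).1.items := by
  simp only [assign_symbols, List.foldl_map, pvStep, pvKeyOf]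

theorem pvLoopA : ∀ (ks : List Int) (d : PySem.Dict Int String), d.keys.Nodup →
    (ks.foldl pvStep (d, (d.size : Int))).1.items = d.items ++ pvSpecNew ks d.keys (d.size : Int) := by
  intro ks
  induction ks with
  | nil => intro d _; simp [pvSpecNew]
  | cons k ks ih =>
    intro d hnd
    by_cases hc : d.contains k = true
    · have hk : k ∈ d.keys := (PySem.Dict.contains_iff_mem_keys d k).mp hc
      have hstep : pvStep (d, (d.size : Int)) k = (d, (d.size : Int)) := by
        simp [pvStep, hc]
      rw [List.foldl_cons, hstep, ih d hnd]
      simp [pvSpecNew, hk]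
    · have hc' : d.contains k = false := by
        cases h : d.contains k
        · rfl
        · exact absurd h hc
      have hk : k ∉ d.keys := fun h => hc ((PySem.Dict.contains_iff_mem_keys d k).mpr h)
      have hitems := PySem.Dict.items_insert_of_not_contains d (pvSym (d.size : Int)) hc'
      have hkeys := PySem.Dict.keys_insert_of_not_contains d (pvSym (d.size : Int)) hc'
      have hsize : (d.insert k (pvSym (d.size : Int))).size = d.size + 1 := by
        rw [PySem.Dict.size_insert]; simp [hc']
      have hnd' : (d.insert k (pvSym (d.size : Int))).keys.Nodup := by
        rw [hkeys]
        refine List.Nodup.append hnd (List.nodup_singleton k) ?_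
        intro a ha hb
        rw [List.mem_singleton] at hb
        exact hk (hb ▸ ha)
      have hcast : ((d.insert k (pvSym (d.size : Int))).size : Int) = (d.size : Int) + 1 := by
        rw [hsize]; push_cast; ring
      have hstep : pvStep (d, (d.size : Int)) k
          = (d.insert k (pvSym (d.size : Int)), (d.size : Int) + 1) := by
        simp [pvStep, hc']
      rw [List.foldl_cons, hstep, ← hcast, ih _ hnd', hitems, hkeys, hcast]
      simp [pvSpecNew, hk, List.append_assoc]

-- B phase 1, with the key extraction fused into the enumerate fold, equals the fold over the key list
theorem pvEnumMap (xs : List (List (String × Int))) : ∀ (s : Int) (d : PySem.Dict Int Int),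
    (PySem.List.enumerate xs s).foldl
        (fun d p => d.setdefault (((PySem.Dict.mk p.2).get? "dmc").getD 0) p.1) d
      = (PySem.List.enumerate (xs.map pvKeyOf) s).foldl (fun d p => d.setdefault p.2 p.1) d := by
  induction xs with
  | nil => intro s d; simp [PySem.List.enumerate_nil]
  | cons x xs ih =>
    intro s d
    simp only [List.map_cons, PySem.List.enumerate_cons, List.foldl_cons]
    exact ih (s + 1) _

-- B phase 1 over a key list: the dict's items are exactly the first-occurrence pairs
theorem pvLoopFirst : ∀ (ks : List Int) (d : PySem.Dict Int Int) (n : Int), d.keys.Nodup →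
    ((PySem.List.enumerate ks n).foldl (fun d p => d.setdefault p.2 p.1) d).items
      = d.items ++ pvFirst ks d.keys n := by
  intro ks
  induction ks with
  | nil => intro d n _; simp [PySem.List.enumerate_nil, pvFirst]
  | cons k ks ih =>
    intro d n hnd
    rw [PySem.List.enumerate_cons, List.foldl_cons]
    by_cases hc : d.contains k = true
    · have hk : k ∈ d.keys := (PySem.Dict.contains_iff_mem_keys d k).mp hc
      have hset : d.setdefault (n, k).2 (n, k).1 = d :=
        PySem.Dict.setdefault_of_contains d (n, k).1 hc
      rw [hset, ih d (n + 1) hnd]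
      simp [pvFirst, hk]
    · have hc' : d.contains k = false := by
        cases h : d.contains k
        · rfl
        · exact absurd h hc
      have hk : k ∉ d.keys := fun h => hc ((PySem.Dict.contains_iff_mem_keys d k).mpr h)
      have hset : d.setdefault (n, k).2 (n, k).1 = d.insert k n :=
        PySem.Dict.setdefault_of_not_contains d (n, k).1 hc'
      rw [hset]
      have hnd' : (d.insert k n).keys.Nodup := by
        rw [PySem.Dict.keys_insert_of_not_contains d n hc']
        refine List.Nodup.append hnd (List.nodup_singleton k) ?_
        intro a ha hb
        rw [List.mem_singleton] at hb
        exact hk (hb ▸ ha)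
      rw [ih _ (n + 1) hnd', PySem.Dict.items_insert_of_not_contains d n hc',
          PySem.Dict.keys_insert_of_not_contains d n hc']
      simp [pvFirst, hk, List.append_assoc]

-- every pair produced by pvFirst has index ≥ n and a key outside seen
theorem pvFirst_mem : ∀ (ks seen : List Int) (n : Int) (p : Int × Int),
    p ∈ pvFirst ks seen n → n ≤ p.2 ∧ p.1 ∉ seen := by
  intro ks
  induction ks with
  | nil => intro seen n p hp; simp [pvFirst] at hp
  | cons k ks ih =>
    intro seen n p hp
    by_cases hk : k ∈ seen
    · simp only [pvFirst, if_pos hk] at hp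
      have := ih seen (n + 1) p hp
      exact ⟨by omega, this.2⟩
    · simp only [pvFirst, if_neg hk, List.mem_cons] at hp
      rcases hp with h | h
      · subst h; exact ⟨le_refl n, hk⟩
      · have := ih (seen ++ [k]) (n + 1) p h
        refine ⟨by omega, fun hs => this.2 (by simp [hs])⟩

-- the indices in pvFirst strictly increase along the list
theorem pvFirst_pairwise : ∀ (ks seen : List Int) (n : Int),
    (pvFirst ks seen n).Pairwise (fun p q => p.2 < q.2) := by
  intro ks
  induction ks with
  | nil => intro seen n; simp [pvFirst]
  | cons k ks ih =>
    intro seen n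
    by_cases hk : k ∈ seen
    · simpa [pvFirst, hk] using ih seen (n + 1)
    · simp only [pvFirst, if_neg hk]
      refine List.Pairwise.cons ?_ (ih (seen ++ [k]) (n + 1))
      intro q hq
      have := (pvFirst_mem ks (seen ++ [k]) (n + 1) q hq).1
      omega

-- the keys in pvFirst are distinct
theorem pvFirst_nodup_fst : ∀ (ks seen : List Int) (n : Int),
    ((pvFirst ks seen n).map Prod.fst).Nodup := by
  intro ks
  induction ks with
  | nil => intro seen n; simp [pvFirst]
  | cons k ks ih =>
    intro seen n
    by_cases hk : k ∈ seen
    · simpa [pvFirst, hk] using ih seen (n + 1)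
    · simp only [pvFirst, if_neg hk, List.map_cons]
      refine List.nodup_cons.mpr ⟨?_, ih (seen ++ [k]) (n + 1)⟩
      intro hmem
      rcases List.mem_map.mp hmem with ⟨p, hp, hfst⟩
      exact (pvFirst_mem ks (seen ++ [k]) (n + 1) p hp).2 (by simp [hfst])

-- ranking the first-occurrence keys reproduces pvSpecNew
theorem pvRank : ∀ (ks seen : List Int) (m n : Int),
    (PySem.List.enumerate ((pvFirst ks seen m).map Prod.fst) n).map
        (fun p => (p.2, pvSym p.1)) = pvSpecNew ks seen n := by
  intro ks
  induction ks with
  | nil => intro seen m n; simp [pvFirst, pvSpecNew, PySem.List.enumerate_nil]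
  | cons k ks ih =>
    intro seen m n
    by_cases hk : k ∈ seen
    · simp only [pvFirst, pvSpecNew, if_pos hk]
      exact ih seen (m + 1) n
    · simp only [pvFirst, pvSpecNew, if_neg hk, List.map_cons, PySem.List.enumerate_cons,
        List.map_cons]
      rw [ih (seen ++ [k]) (m + 1) (n + 1)]

theorem pvB_phase2 (first : PySem.Dict Int Int) (ks : List Int)
    (hitems : first.items = pvFirst ks [] 0) :
    ((PySem.List.enumerate
        (PySem.List.sorted first.keys (fun k => (first.get? k).getD 0) false)).foldl
        (fun (d : PySem.Dict Int String) p => d.insert p.2 (pvSym p.1))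
        PySem.Dict.empty).items = pvSpecNew ks [] 0 := by
  have hkeys : first.keys = (pvFirst ks [] 0).map Prod.fst := by
    simp only [PySem.Dict.keys, hitems]
  have hndk : first.keys.Nodup := by rw [hkeys]; exact pvFirst_nodup_fst ks [] 0
  -- sorting the keys by first-occurrence index is the identity: keys already appear in that order
  have hsorted : PySem.List.sorted first.keys (fun k => (first.get? k).getD 0) false
      = first.keys := by
    apply PySem.List.sorted_eq_self_of_pairwise
    rw [hkeys, List.pairwise_map]
    have hpw := pvFirst_pairwise ks [] 0
    refine List.Pairwise.imp_of_mem ?_ hpw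
    intro p q hp hq hlt
    have hgp : first.get? p.1 = some p.2 :=
      PySem.Dict.get?_of_mem_items first (by rw [hitems]; exact hp) hndk
    have hgq : first.get? q.1 = some q.2 :=
      PySem.Dict.get?_of_mem_items first (by rw [hitems]; exact hq) hndk
    simp only [hgp, hgq, Option.getD_some]
    omega
  rw [hsorted]
  -- phase 2: inserting fresh distinct keys appends, so items = the mapped enumerate
  rw [PySem.Dict.items_foldl_insert_fresh (PySem.List.enumerate first.keys 0)
        (fun p => p.2) (fun p => pvSym p.1) PySem.Dict.empty
        (by intro a _; exact PySem.Dict.contains_empty a.2)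
        (by rw [PySem.List.map_snd_enumerate]; exact hndk)]
  rw [hkeys]
  simpa using pvRank ks [] 0 0

theorem pvB_eq (dmc_list : List (List (String × Int))) :
    assign_symbols_alt dmc_list = pvSpecNew (dmc_list.map pvKeyOf) [] 0 := by
  unfold assign_symbols_alt
  rw [pvEnumMap]
  exact pvB_phase2 _ (dmc_list.map pvKeyOf)
    (by rw [pvLoopFirst _ PySem.Dict.empty 0 PySem.Dict.nodup_keys_empty]
        simp [PySem.Dict.empty, PySem.Dict.keys])

-- ===== VERDICT (by name: the statement is the Claim_ definition above) =====
theorem assign_symbols_spec : Claim_equal_assign_symbols := by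
  intro dmc_list _ _
  unfold Spec_assign_symbols
  rw [pvA_as_keys, pvB_eq]
  have h := pvLoopA (dmc_list.map pvKeyOf) PySem.Dict.empty PySem.Dict.nodup_keys_empty
  simpa [PySem.Dict.empty, PySem.Dict.size, PySem.Dict.keys, PySem.Dict.items] using h
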